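-- pv_equiv track=rewrite | github.com/woodrush/QFT-devkit | qftramheader.py | decode_stdin_buffer
-- ===== SOURCE A (Python) =====
-- def decode_stdin_buffer(stdin_buf):
--     ret = []
--     for b in stdin_buf:
--         n = b & 0b0000000011111111
--         if n == 0:
--             break
--         ret.append(n)
--
--         n = b >> 8
--         if n == 0:
--             break
--         ret.append(n)
--
--     return "".join([chr(i) for i in ret])
-- ===== SOURCE B (Python) =====
-- def decode_stdin_buffer(stdin_buf):
--     stream = [x for b in stdin_buf for x in (b & 0b0000000011111111, b >> 8)]
--     if 0 in stream:
--         stream = stream[:stream.index(0)]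
--     return "".join(map(chr, stream))
-- ===== Notes on version B (the rewrite author's own statement) =====
-- stated objective: idiomatic
-- what changed: A's per-word loop with two interleaved break points is replaced by a flatten-then-cut pipeline: build the full interleaved byte stream with one comprehension, cut it at the first zero via index/slice, then map chr and join.
-- outside the precondition, e.g. on decode_stdin_buffer([-300]): A raises ValueError, B raises ValueError
import Mathlib
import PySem

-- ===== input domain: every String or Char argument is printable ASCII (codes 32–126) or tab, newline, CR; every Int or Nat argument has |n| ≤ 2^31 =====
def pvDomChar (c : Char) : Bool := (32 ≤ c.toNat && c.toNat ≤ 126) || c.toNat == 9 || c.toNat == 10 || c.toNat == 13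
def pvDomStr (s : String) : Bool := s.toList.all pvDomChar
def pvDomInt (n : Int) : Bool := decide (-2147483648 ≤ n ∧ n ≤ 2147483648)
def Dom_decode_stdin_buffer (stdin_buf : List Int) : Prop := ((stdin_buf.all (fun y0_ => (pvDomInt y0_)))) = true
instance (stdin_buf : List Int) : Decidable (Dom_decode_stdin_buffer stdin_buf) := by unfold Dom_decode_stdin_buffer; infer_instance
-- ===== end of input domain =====

-- B replaces A's per-word loop with two break points by a flatten-then-cut-at-zero pipeline (idiomatic; same cost).

-- ===== PORT A =====
-- chr(i): exact for the codes admitted by Pre_ (valid non-surrogate scalar values)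
def pvChr (i : Int) : Char := Char.ofNat i.toNat

-- the for-loop over stdin_buf accumulating ret, with its two break points
def pvDecodeLoop : List Int → List Int
  | [] => []
  | b :: rest =>
    let n1 := PySem.Int.mod b 256        -- b & 0xFF = b % 256 in Python, exact for every b
    if n1 == 0 then []
    else
      let n2 := PySem.Int.floordiv b 256 -- b >> 8 = b // 256 in Python, exact for every b
      if n2 == 0 then [n1]
      else n1 :: n2 :: pvDecodeLoop rest

def decode_stdin_buffer (stdin_buf : List Int) : String :=
  String.ofList ((pvDecodeLoop stdin_buf).map (fun i => pvChr i))

-- ===== PORT B =====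
-- [x for b in stdin_buf for x in (b & 0xFF, b >> 8)]
def pvByteStream (stdin_buf : List Int) : List Int :=
  stdin_buf.flatMap (fun b => [PySem.Int.mod b 256, PySem.Int.floordiv b 256])

-- if 0 in stream: stream = stream[:stream.index(0)]  (index cannot be none in the branch)
def pvCutZero (s : List Int) : List Int :=
  if (0 : Int) ∈ s then
    match PySem.List.index? s 0 with
    | some i => PySem.List.slice s none (some (i : Int))
    | none => s
  else s

def decode_stdin_buffer_alt (stdin_buf : List Int) : String :=
  String.ofList ((pvCutZero (pvByteStream stdin_buf)).map (fun i => pvChr i))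

-- ===== PRECONDITION & SPEC =====
-- Pre_ excludes inputs on which chr raises ValueError (a decoded high byte negative or ≥ 0x110000)
-- and inputs whose decoded high byte is a UTF-16 surrogate, where Python returns a string that is
-- not a value of Lean's String type; low bytes are always in 0..255 and never problematic.
def Pre_decode_stdin_buffer (stdin_buf : List Int) : Prop :=
  ∀ b ∈ stdin_buf.takeWhile
      (fun b => !(PySem.Int.mod b 256 == 0 || PySem.Int.floordiv b 256 == 0)),
    0 ≤ PySem.Int.floordiv b 256 ∧
      (PySem.Int.floordiv b 256 < 55296 ∨
        (57343 < PySem.Int.floordiv b 256 ∧ PySem.Int.floordiv b 256 < 1114112))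
instance (stdin_buf : List Int) : Decidable (Pre_decode_stdin_buffer stdin_buf) := by
  unfold Pre_decode_stdin_buffer; infer_instance

def pvWitness_decode_stdin_buffer : List Int := [25960, 27756, 111]

def Spec_decode_stdin_buffer (stdin_buf : List Int) (out : String) : Prop := out = decode_stdin_buffer_alt stdin_buf
instance (stdin_buf : List Int) (out : String) : Decidable (Spec_decode_stdin_buffer stdin_buf out) := by unfold Spec_decode_stdin_buffer; infer_instance

-- ===== CLAIM (what is proved, stated in full; the proofs are below) =====
def Claim_equal_decode_stdin_buffer : Prop := ∀ (stdin_buf : List Int), Dom_decode_stdin_buffer stdin_buf → Pre_decode_stdin_buffer stdin_buf → Spec_decode_stdin_buffer stdin_buf (decode_stdin_buffer stdin_buf)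

-- ===== LEMMAS AND PROOFS =====

-- taking up to the first index of 0 is taking while nonzero
theorem pv_take_index (s : List Int) : ∀ i, PySem.List.index? s 0 = some i →
    s.take i = s.takeWhile (fun x => x != 0) := by
  induction s with
  | nil => intro i h; simp [PySem.List.index?] at h
  | cons x t ih =>
    intro i h
    by_cases hx : x = 0
    · subst hx
      rw [PySem.List.index?_cons_self] at h
      cases h
      simp
    · rw [PySem.List.index?_cons_of_ne t hx] at h
      obtain ⟨j, hj, rfl⟩ := Option.map_eq_some_iff.mp h
      simp [hx, ih j hj]

-- with no 0 present, takeWhile (· != 0) is the identity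
theorem pv_takeWhile_of_not_mem (s : List Int) (h : (0 : Int) ∉ s) :
    s.takeWhile (fun x => x != 0) = s := by
  induction s with
  | nil => rfl
  | cons x t ih =>
    simp only [List.mem_cons, not_or] at h
    simp [Ne.symm h.1, ih h.2]

-- B's cut step is takeWhile nonzero
theorem pvCutZero_eq_takeWhile (s : List Int) :
    pvCutZero s = s.takeWhile (fun x => x != 0) := by
  unfold pvCutZero
  by_cases hm : (0 : Int) ∈ s
  · have hiopt : (PySem.List.index? s 0).isSome :=
      (PySem.List.index?_isSome_iff _ _).mpr hm
    obtain ⟨i, hi⟩ := Option.isSome_iff_exists.mp hiopt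
    simp only [hm, if_true, hi]
    rw [PySem.List.slice_to_natCast, pv_take_index s i hi]
  · simp [hm, pv_takeWhile_of_not_mem s hm]

-- A's loop computes takeWhile nonzero of the interleaved byte stream
theorem pvDecodeLoop_eq (l : List Int) :
    pvDecodeLoop l = (pvByteStream l).takeWhile (fun x => x != 0) := by
  induction l with
  | nil => rfl
  | cons b t ih =>
    have hs : pvByteStream (b :: t) =
        PySem.Int.mod b 256 :: PySem.Int.floordiv b 256 :: pvByteStream t := rfl
    have hl : pvDecodeLoop (b :: t) =
        if PySem.Int.mod b 256 == 0 then []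
        else if PySem.Int.floordiv b 256 == 0 then [PySem.Int.mod b 256]
        else PySem.Int.mod b 256 :: PySem.Int.floordiv b 256 :: pvDecodeLoop t := rfl
    rw [hl, hs, List.takeWhile_cons]
    by_cases h1 : PySem.Int.mod b 256 = 0
    · have e1 : (PySem.Int.mod b 256 == 0) = true := by simp only [beq_iff_eq]; exact h1
      have e1' : ¬ ((PySem.Int.mod b 256 != 0) = true) := by
        simp only [bne_iff_ne, ne_eq, not_not]; exact h1
      rw [if_pos e1, if_neg e1']
    · have e1 : ¬ ((PySem.Int.mod b 256 == 0) = true) := by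
        simp only [beq_iff_eq]; exact h1
      have e1' : (PySem.Int.mod b 256 != 0) = true := by simp only [bne_iff_ne]; exact h1
      rw [if_neg e1, if_pos e1', List.takeWhile_cons]
      by_cases h2 : PySem.Int.floordiv b 256 = 0
      · have e2 : (PySem.Int.floordiv b 256 == 0) = true := by simp only [beq_iff_eq]; exact h2
        have e2' : ¬ ((PySem.Int.floordiv b 256 != 0) = true) := by
          simp only [bne_iff_ne, ne_eq, not_not]; exact h2
        rw [if_pos e2, if_neg e2']
      · have e2 : ¬ ((PySem.Int.floordiv b 256 == 0) = true) := by
          simp only [beq_iff_eq]; exact h2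
        have e2' : (PySem.Int.floordiv b 256 != 0) = true := by simp only [bne_iff_ne]; exact h2
        rw [if_neg e2, if_pos e2', ih]

-- ===== VERDICT (by name: the statement is the Claim_ definition above) =====
theorem decode_stdin_buffer_spec : Claim_equal_decode_stdin_buffer := by
  intro l _ _
  unfold Spec_decode_stdin_buffer decode_stdin_buffer decode_stdin_buffer_alt
  rw [pvCutZero_eq_takeWhile, pvDecodeLoop_eq]
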